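-- pv_equiv track=rewrite | github.com/amJenish/RL-Traffic-Light-Optimization | modelling/schedule_export.py | _link_signal_summary
-- ===== SOURCE A (Python) =====
-- def _link_signal_summary(state: str) -> str:
--     """Short decoding of SUMO phase ``state`` (one char per controlled link)."""
--     if not state:
--         return "No state string recorded."
--     n_g = sum(1 for c in state if c == "G")
--     n_gm = sum(1 for c in state if c == "g")
--     n_y = sum(1 for c in state if c == "y")
--     n_r = sum(1 for c in state if c == "r")
--     n_o = sum(1 for c in state if c not in "Ggyr")
--     parts = []
--     if n_g:
--         parts.append(f"{n_g} link(s) major green (G)")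
--     if n_gm:
--         parts.append(f"{n_gm} link(s) minor green (g)")
--     if n_y:
--         parts.append(f"{n_y} yellow (y)")
--     if n_r:
--         parts.append(f"{n_r} red (r)")
--     if n_o:
--         parts.append(f"{n_o} other / off ({n_o} chars)")
--     return "Signal links in SUMO order: " + ", ".join(parts) + "."
-- ===== SOURCE B (Python) =====
-- def _link_signal_summary(state: str) -> str:
--     """Short decoding of SUMO phase ``state`` (one char per controlled link)."""
--     if not state:
--         return "No state string recorded."
--     n_g = n_gm = n_y = n_r = n_o = 0
--     for c in state:
--         if c == "G":
--             n_g += 1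
--         elif c == "g":
--             n_gm += 1
--         elif c == "y":
--             n_y += 1
--         elif c == "r":
--             n_r += 1
--         else:
--             n_o += 1
--     labeled = [
--         (n_g, f"{n_g} link(s) major green (G)"),
--         (n_gm, f"{n_gm} link(s) minor green (g)"),
--         (n_y, f"{n_y} yellow (y)"),
--         (n_r, f"{n_r} red (r)"),
--         (n_o, f"{n_o} other / off ({n_o} chars)"),
--     ]
--     body = ", ".join(label for n, label in labeled if n)
--     return "Signal links in SUMO order: " + body + "."
-- ===== Notes on version B (the rewrite author's own statement) =====
-- stated objective: faster
-- what changed: B makes a single pass over state dispatching each character into one of five accumulators (instead of A's five separate full scans), then builds the output by filtering a data table of (count, label) pairs and joining, instead of A's chain of conditional appends.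
import Mathlib
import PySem

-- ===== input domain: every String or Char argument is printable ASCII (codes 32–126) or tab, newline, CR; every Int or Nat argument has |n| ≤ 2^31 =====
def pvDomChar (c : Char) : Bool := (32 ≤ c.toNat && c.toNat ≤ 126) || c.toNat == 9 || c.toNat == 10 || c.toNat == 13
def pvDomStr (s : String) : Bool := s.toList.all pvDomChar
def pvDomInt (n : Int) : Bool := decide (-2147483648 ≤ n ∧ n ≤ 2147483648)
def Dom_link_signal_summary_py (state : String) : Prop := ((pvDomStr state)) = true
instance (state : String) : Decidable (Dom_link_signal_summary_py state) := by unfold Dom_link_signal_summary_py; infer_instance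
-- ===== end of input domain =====

-- B does one classifying pass with five accumulators and table-driven filter/join formatting, instead of A's five scans and chained conditional appends (timing: measurably faster by constant factor).

-- ===== PORT A =====
def link_signal_summary_py (state : String) : String :=
  if state = "" then "No state string recorded."
  else
    let cs := state.toList
    let n_g : Int := cs.foldl (fun acc c => if c == 'G' then acc + 1 else acc) 0
    let n_gm : Int := cs.foldl (fun acc c => if c == 'g' then acc + 1 else acc) 0
    let n_y : Int := cs.foldl (fun acc c => if c == 'y' then acc + 1 else acc) 0
    let n_r : Int := cs.foldl (fun acc c => if c == 'r' then acc + 1 else acc) 0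
    let n_o : Int := cs.foldl (fun acc c => if !("Ggyr".toList.contains c) then acc + 1 else acc) 0
    let parts : List String := []
    let parts := if n_g ≠ 0 then parts ++ [PySem.Int.toStr n_g ++ " link(s) major green (G)"] else parts
    let parts := if n_gm ≠ 0 then parts ++ [PySem.Int.toStr n_gm ++ " link(s) minor green (g)"] else parts
    let parts := if n_y ≠ 0 then parts ++ [PySem.Int.toStr n_y ++ " yellow (y)"] else parts
    let parts := if n_r ≠ 0 then parts ++ [PySem.Int.toStr n_r ++ " red (r)"] else parts
    let parts := if n_o ≠ 0 then parts ++ [PySem.Int.toStr n_o ++ " other / off (" ++ PySem.Int.toStr n_o ++ " chars)"] else parts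
    "Signal links in SUMO order: " ++ PySem.Str.join ", " parts ++ "."

-- ===== PORT B =====
def link_signal_summary_py_alt (state : String) : String :=
  if state = "" then "No state string recorded."
  else
    let cnt := state.toList.foldl (fun (t : Int × Int × Int × Int × Int) c =>
      if c == 'G' then (t.1 + 1, t.2.1, t.2.2.1, t.2.2.2.1, t.2.2.2.2)
      else if c == 'g' then (t.1, t.2.1 + 1, t.2.2.1, t.2.2.2.1, t.2.2.2.2)
      else if c == 'y' then (t.1, t.2.1, t.2.2.1 + 1, t.2.2.2.1, t.2.2.2.2)
      else if c == 'r' then (t.1, t.2.1, t.2.2.1, t.2.2.2.1 + 1, t.2.2.2.2)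
      else (t.1, t.2.1, t.2.2.1, t.2.2.2.1, t.2.2.2.2 + 1)) (0, 0, 0, 0, 0)
    let labeled : List (Int × String) := [
      (cnt.1, PySem.Int.toStr cnt.1 ++ " link(s) major green (G)"),
      (cnt.2.1, PySem.Int.toStr cnt.2.1 ++ " link(s) minor green (g)"),
      (cnt.2.2.1, PySem.Int.toStr cnt.2.2.1 ++ " yellow (y)"),
      (cnt.2.2.2.1, PySem.Int.toStr cnt.2.2.2.1 ++ " red (r)"),
      (cnt.2.2.2.2, PySem.Int.toStr cnt.2.2.2.2 ++ " other / off (" ++ PySem.Int.toStr cnt.2.2.2.2 ++ " chars)")]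
    "Signal links in SUMO order: " ++ PySem.Str.join ", " ((labeled.filter (fun p => decide (p.1 ≠ 0))).map Prod.snd) ++ "."

-- ===== PRECONDITION & SPEC =====
def Spec_link_signal_summary_py (state : String) (out : String) : Prop := out = link_signal_summary_py_alt state
instance (state : String) (out : String) : Decidable (Spec_link_signal_summary_py state out) := by unfold Spec_link_signal_summary_py; infer_instance

-- ===== CLAIM =====
def Claim_equal_link_signal_summary_py : Prop := ∀ (state : String), Dom_link_signal_summary_py state → Spec_link_signal_summary_py state (link_signal_summary_py state)

-- ===== LEMMAS AND PROOFS =====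
set_option maxHeartbeats 1600000

-- B's single classifying fold computes the four per-character counts and the 'other' count.
theorem pv_fold_tuple (l : List Char) (a b c d e : Int) :
    l.foldl (fun (t : Int × Int × Int × Int × Int) ch =>
      if ch == 'G' then (t.1 + 1, t.2.1, t.2.2.1, t.2.2.2.1, t.2.2.2.2)
      else if ch == 'g' then (t.1, t.2.1 + 1, t.2.2.1, t.2.2.2.1, t.2.2.2.2)
      else if ch == 'y' then (t.1, t.2.1, t.2.2.1 + 1, t.2.2.2.1, t.2.2.2.2)
      else if ch == 'r' then (t.1, t.2.1, t.2.2.1, t.2.2.2.1 + 1, t.2.2.2.2)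
      else (t.1, t.2.1, t.2.2.1, t.2.2.2.1, t.2.2.2.2 + 1)) (a, b, c, d, e)
    = (a + l.count 'G', b + l.count 'g', c + l.count 'y', d + l.count 'r',
       e + l.countP (fun ch => !(['G','g','y','r'].contains ch))) := by
  induction l generalizing a b c d e with
  | nil => simp
  | cons ch t ih =>
    simp only [List.foldl_cons, List.count_cons, List.countP_cons]
    by_cases hG : ch = 'G' <;> by_cases hg : ch = 'g' <;> by_cases hy : ch = 'y' <;>
      by_cases hr : ch = 'r' <;> simp_all <;> omega

-- ===== VERDICT =====
theorem link_signal_summary_py_spec : Claim_equal_link_signal_summary_py := by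
  intro state _
  unfold Spec_link_signal_summary_py link_signal_summary_py link_signal_summary_py_alt
  by_cases h : state = ""
  · simp [h]
  · simp only [h, ite_false]
    have e1 := PySem.List.foldl_beq_add_one (l := state.toList) (v := 'G') (a := (0 : Int))
    have e2 := PySem.List.foldl_beq_add_one (l := state.toList) (v := 'g') (a := (0 : Int))
    have e3 := PySem.List.foldl_beq_add_one (l := state.toList) (v := 'y') (a := (0 : Int))
    have e4 := PySem.List.foldl_beq_add_one (l := state.toList) (v := 'r') (a := (0 : Int))
    have hs : "Ggyr".toList = ['G','g','y','r'] := rfl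
    have e5 : (state.toList.foldl (fun acc c => if !("Ggyr".toList.contains c) then acc + 1 else acc) (0:Int))
        = 0 + (state.toList.countP (fun c => !(['G','g','y','r'].contains c)) : Int) := by
      rw [PySem.List.foldl_if_add_one, hs]
    have eB := pv_fold_tuple state.toList 0 0 0 0 0
    simp only [e1, e2, e3, e4, e5, eB, zero_add, List.filter]
    set ng : Int := (state.toList.count 'G' : Int)
    set ngm : Int := (state.toList.count 'g' : Int)
    set ny : Int := (state.toList.count 'y' : Int)
    set nr : Int := (state.toList.count 'r' : Int)
    set no : Int := (state.toList.countP (fun ch => !(['G','g','y','r'].contains ch)) : Int)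
    by_cases h1 : ng = 0 <;> by_cases h2 : ngm = 0 <;> by_cases h3 : ny = 0 <;>
      by_cases h4 : nr = 0 <;> by_cases h5 : no = 0 <;>
      simp_all [List.map]
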